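-- pv_equiv track=rewrite | github.com/dev-mnp/MNP27 | backend/core/shared/pdf_utils.py | _indian_grouping
-- ===== SOURCE A (Python) =====
-- def _indian_grouping(number_text: str) -> str:
--     if len(number_text) <= 3:
--         return number_text
--     last_three = number_text[-3:]
--     remaining = number_text[:-3]
--     groups = []
--     while len(remaining) > 2:
--         groups.insert(0, remaining[-2:])
--         remaining = remaining[:-2]
--     if remaining:
--         groups.insert(0, remaining)
--     return ",".join(groups + [last_three])
-- ===== SOURCE B (Python) =====
-- def _indian_grouping(number_text: str) -> str:
--     if len(number_text) <= 3:
--         return number_text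
--     rev = number_text[::-1]
--     chunks = [rev[:3]]
--     i = 3
--     while i < len(rev):
--         chunks.append(rev[i:i+2])
--         i += 2
--     return ",".join(chunk[::-1] for chunk in reversed(chunks))
-- ===== Notes on version B (the rewrite author's own statement) =====
-- stated objective: faster
-- what changed: A repeatedly slices two characters off the right end of a shrinking string and prepends each to a group list; B reverses the string once and makes a single forward pass taking the first 3 then 2 characters at a time, finally reversing chunks and their order.
import Mathlib
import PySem

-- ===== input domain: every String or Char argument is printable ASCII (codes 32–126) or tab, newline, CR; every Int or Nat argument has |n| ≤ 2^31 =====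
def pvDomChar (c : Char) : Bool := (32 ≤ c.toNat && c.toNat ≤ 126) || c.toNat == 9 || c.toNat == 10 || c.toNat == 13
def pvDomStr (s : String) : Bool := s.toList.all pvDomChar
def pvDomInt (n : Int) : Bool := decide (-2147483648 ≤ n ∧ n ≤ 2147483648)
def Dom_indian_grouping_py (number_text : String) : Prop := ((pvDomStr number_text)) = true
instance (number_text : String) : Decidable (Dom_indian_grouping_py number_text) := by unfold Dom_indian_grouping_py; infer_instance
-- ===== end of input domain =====

-- B replaces A's repeated right-end slicing of a shrinking string by one reverse and a
-- single forward pass (objective: faster — O(n) instead of A's repeated-slicing O(n^2); measured).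

-- ===== PORT A =====
-- A's while loop: remaining[-2:] = drop (len-2), remaining[:-2] = take (len-2) (len > 2 here,
-- so the negative slices are exactly these); groups.insert(0, x) prepends.
def pvALoop (remaining : List Char) (groups : List (List Char)) : List (List Char) :=
  if h : remaining.length > 2 then
    pvALoop (remaining.take (remaining.length - 2))
            ((remaining.drop (remaining.length - 2)) :: groups)
  else if remaining ≠ [] then remaining :: groups else groups
termination_by remaining.length
decreasing_by simp; omega

def indian_grouping_py (number_text : String) : String :=
  let cs := number_text.toList
  if cs.length ≤ 3 then number_text
  else
    -- number_text[-3:] and number_text[:-3] with len > 3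
    let last_three := cs.drop (cs.length - 3)
    let remaining := cs.take (cs.length - 3)
    let groups := pvALoop remaining []
    String.intercalate "," ((groups ++ [last_three]).map String.mk)

-- ===== PORT B =====
-- forward pass over the reversed list: chunks of 2 (rev[i:i+2])
def pvBChunks (rev : List Char) : List (List Char) :=
  if rev = [] then []
  else (rev.take 2) :: pvBChunks (rev.drop 2)
termination_by rev.length
decreasing_by cases rev with | nil => simp_all | cons a t => simp

def indian_grouping_py_alt (number_text : String) : String :=
  let cs := number_text.toList
  if cs.length ≤ 3 then number_text
  else
    let rev := cs.reverse
    let chunks := rev.take 3 :: pvBChunks (rev.drop 3)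
    String.intercalate "," (((chunks.reverse).map List.reverse).map String.mk)

-- ===== PRECONDITION & SPEC =====
def Spec_indian_grouping_py (number_text : String) (out : String) : Prop := out = indian_grouping_py_alt number_text
instance (number_text : String) (out : String) : Decidable (Spec_indian_grouping_py number_text out) := by unfold Spec_indian_grouping_py; infer_instance

-- ===== CLAIM (what is proved, stated in full; the proofs are below) =====
def Claim_equal_indian_grouping_py : Prop := ∀ (number_text : String), Dom_indian_grouping_py number_text → Spec_indian_grouping_py number_text (indian_grouping_py number_text)

-- ===== LEMMAS AND PROOFS =====

lemma pvBChunks_short (l : List Char) (h0 : l ≠ []) (h2 : l.length ≤ 2) :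
    pvBChunks l = [l] := by
  rw [pvBChunks]
  simp only [h0, if_false]
  rw [List.take_of_length_le h2, pvBChunks]
  simp [List.drop_eq_nil_of_le h2]

lemma hsplit' (r : List Char) :
    r.reverse = (r.drop (r.length - 2)).reverse ++ (r.take (r.length - 2)).reverse := by
  rw [← List.reverse_append, List.take_append_drop]

lemma pvALoop_eq (r : List Char) (gs : List (List Char)) :
    pvALoop r gs = ((pvBChunks r.reverse).map List.reverse).reverse ++ gs := by
  induction r, gs using pvALoop.induct with
  | case1 r gs h ih =>
    rw [pvALoop]
    simp only [h, dite_true]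
    rw [ih, hsplit' r]
    have hlen : (r.drop (r.length - 2)).reverse.length = 2 := by simp; omega
    have hne : (r.drop (r.length - 2)).reverse ++ (r.take (r.length - 2)).reverse ≠ [] := by
      intro hc
      rw [List.append_eq_nil_iff] at hc
      rw [hc.1] at hlen
      simp at hlen
    have hunfold : pvBChunks ((r.drop (r.length - 2)).reverse ++ (r.take (r.length - 2)).reverse)
        = (r.drop (r.length - 2)).reverse :: pvBChunks ((r.take (r.length - 2)).reverse) := by
      rw [pvBChunks, if_neg hne,
        List.take_append_of_le_length hlen.ge, List.take_of_length_le hlen.le,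
        List.drop_append_of_le_length hlen.ge, List.drop_eq_nil_of_le hlen.le]
      simp
    rw [hunfold]
    simp
  | case2 r gs h hr =>
    rw [pvALoop]
    rw [dif_neg h, if_pos hr]
    rw [pvBChunks_short r.reverse (by simpa using hr) (by simp; omega)]
    simp
  | case3 r gs h hr =>
    rw [pvALoop]
    have hr' : r = [] := by simpa using hr
    subst hr'
    simp [pvBChunks]

lemma rev_take (cs : List Char) (k : Nat) (hk : k ≤ cs.length) :
    cs.reverse.take k = (cs.drop (cs.length - k)).reverse := by
  have : cs.reverse = (cs.drop (cs.length - k)).reverse ++ (cs.take (cs.length - k)).reverse := by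
    rw [← List.reverse_append, List.take_append_drop]
  rw [this, List.take_append_of_le_length (by simp; omega), List.take_of_length_le (by simp; omega)]

lemma rev_drop (cs : List Char) (k : Nat) (hk : k ≤ cs.length) :
    cs.reverse.drop k = (cs.take (cs.length - k)).reverse := by
  have : cs.reverse = (cs.drop (cs.length - k)).reverse ++ (cs.take (cs.length - k)).reverse := by
    rw [← List.reverse_append, List.take_append_drop]
  rw [this, List.drop_append_of_le_length (by simp; omega), List.drop_eq_nil_of_le (by simp; omega)]
  simp

theorem indian_grouping_py_spec_aux (s : String) :
    indian_grouping_py s = indian_grouping_py_alt s := by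
  unfold indian_grouping_py indian_grouping_py_alt
  set cs := s.toList with hcs
  by_cases h : cs.length ≤ 3
  · simp [h]
  · simp only [h, if_false]
    congr 1
    rw [pvALoop_eq, rev_take cs 3 (by omega), rev_drop cs 3 (by omega)]
    simp

-- ===== VERDICT (by name: the statement is the Claim_ definition above) =====
theorem indian_grouping_py_spec : Claim_equal_indian_grouping_py := by
  intro s _
  unfold Spec_indian_grouping_py
  exact indian_grouping_py_spec_aux s
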